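-- pv_equiv track=rewrite | github.com/DefensiveCyber/prism | prism_tier2/prism_tier2/cleaner.py | _count_depth
-- ===== SOURCE A (Python) =====
-- def _count_depth(line: str) -> int:
--     """Count net brace/bracket depth change for a line (naive, ignores strings)."""
--     depth = 0
--     in_str = False
--     esc = False
--     for ch in line:
--         if esc:
--             esc = False
--             continue
--         if ch == '\\' and in_str:
--             esc = True
--             continue
--         if ch == '"':
--             in_str = not in_str
--             continue
--         if in_str:
--             continue
--         if ch in '{[':
--             depth += 1
--         elif ch in '}]':
--             depth -= 1
--     return depth
-- ===== SOURCE B (Python) =====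
-- def _count_depth(line: str) -> int:
--     """Count net brace/bracket depth change for a line (naive, ignores strings)."""
--     depth = 0
--     i = 0
--     n = len(line)
--     while i < n:
--         ch = line[i]
--         if ch == '"':
--             # skip over the whole string literal (backslash escapes one char;
--             # an unterminated string swallows the rest of the line)
--             i += 1
--             while i < n:
--                 if line[i] == '\\':
--                     i += 2
--                 elif line[i] == '"':
--                     i += 1
--                     break
--                 else:
--                     i += 1
--         elif ch in '{[':
--             depth += 1
--             i += 1
--         elif ch in '}]':
--             depth -= 1
--             i += 1
--         else:
--             i += 1
--     return depth
-- ===== Notes on version B (the rewrite author's own statement) =====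
-- stated objective: alternative
-- what changed: Replaced A's per-character state machine with in_str/esc boolean flags by a skip-ahead scanner: an outer loop counts brackets in code and, on an opening quote, an inner loop consumes the whole string literal (jumping two characters past a backslash escape) before the outer loop resumes.
import Mathlib
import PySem

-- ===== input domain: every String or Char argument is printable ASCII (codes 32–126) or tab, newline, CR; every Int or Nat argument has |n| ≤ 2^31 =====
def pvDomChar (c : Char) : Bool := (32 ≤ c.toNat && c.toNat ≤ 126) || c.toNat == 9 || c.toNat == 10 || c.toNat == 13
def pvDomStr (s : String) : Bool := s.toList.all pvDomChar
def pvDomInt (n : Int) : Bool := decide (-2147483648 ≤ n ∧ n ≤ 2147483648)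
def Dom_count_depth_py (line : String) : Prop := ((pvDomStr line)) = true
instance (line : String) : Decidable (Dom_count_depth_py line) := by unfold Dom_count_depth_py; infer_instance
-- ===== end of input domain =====

-- B replaces A's per-character in_str/esc flag machine by a skip-ahead scanner that
-- consumes each quoted string region in an inner loop (objective: alternative).

-- ===== PORT A =====
-- state = (depth, in_str, esc); one step per character, branches in A's order
def pvStepA (st : Int × Bool × Bool) (ch : Char) : Int × Bool × Bool :=
  if st.2.2 then (st.1, st.2.1, false)
  else if ch = '\\' ∧ st.2.1 then (st.1, st.2.1, true)
  else if ch = '"' then (st.1, !st.2.1, false)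
  else if st.2.1 then st
  else if ch = '{' ∨ ch = '[' then (st.1 + 1, st.2.1, false)
  else if ch = '}' ∨ ch = ']' then (st.1 - 1, st.2.1, false)
  else st

def count_depth_py (line : String) : Int :=
  (line.toList.foldl pvStepA (0, false, false)).1

-- ===== PORT B =====
-- inner while loop: skip the body of a string literal, return what follows it
def pvSkipStr : List Char → List Char
  | [] => []
  | c :: rest =>
    if c = '\\' then pvSkipStr rest.tail          -- i += 2
    else if c = '"' then rest                      -- closing quote
    else pvSkipStr rest
termination_by l => l.length
decreasing_by
  · simp [List.length_tail]
  · simp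

-- length bound needed only for pvGoB's termination
lemma pvSkipStrAux_len : ∀ (n : Nat) (l : List Char), l.length ≤ n →
    (pvSkipStr l).length ≤ l.length := by
  intro n
  induction n with
  | zero =>
    intro l h
    have : l = [] := List.length_eq_zero_iff.mp (Nat.le_zero.mp h)
    subst this; simp [pvSkipStr]
  | succ n ih =>
    intro l h
    match l with
    | [] => simp [pvSkipStr]
    | c :: rest =>
      rw [pvSkipStr]
      split_ifs with h1 h2
      · have := ih rest.tail (by simp [List.length_tail] at h ⊢; omega)
        simp [List.length_tail] at this ⊢; omega
      · simp
      · have := ih rest (by simp at h; omega)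
        simp; omega

lemma pvSkipStr_len (l : List Char) : (pvSkipStr l).length ≤ l.length :=
  pvSkipStrAux_len l.length l le_rfl

-- outer while loop
def pvGoB : List Char → Int → Int
  | [], d => d
  | c :: rest, d =>
    if c = '"' then pvGoB (pvSkipStr rest) d
    else if c = '{' ∨ c = '[' then pvGoB rest (d + 1)
    else if c = '}' ∨ c = ']' then pvGoB rest (d - 1)
    else pvGoB rest d
termination_by l _ => l.length
decreasing_by
  · have := pvSkipStr_len rest
    simp; omega
  all_goals simp

def count_depth_py_alt (line : String) : Int :=
  pvGoB line.toList 0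

-- ===== PRECONDITION & SPEC =====
def Spec_count_depth_py (line : String) (out : Int) : Prop := out = count_depth_py_alt line
instance (line : String) (out : Int) : Decidable (Spec_count_depth_py line out) := by unfold Spec_count_depth_py; infer_instance

-- ===== CLAIM (what is proved, stated in full; the proofs are below) =====
def Claim_equal_count_depth_py : Prop := ∀ (line : String), Dom_count_depth_py line → Spec_count_depth_py line (count_depth_py line)

-- ===== LEMMAS AND PROOFS =====

-- A's fold agrees with B, simultaneously for the out-of-string state (left conjunct)
-- and the in-string state (right conjunct, after B skips the string body)
lemma pvBoth : ∀ (n : Nat) (l : List Char), l.length ≤ n → ∀ (d : Int),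
    (List.foldl pvStepA (d, false, false) l).1 = pvGoB l d ∧
    (List.foldl pvStepA (d, true, false) l).1 = pvGoB (pvSkipStr l) d := by
  intro n
  induction n with
  | zero =>
    intro l h d
    have : l = [] := List.length_eq_zero_iff.mp (Nat.le_zero.mp h)
    subst this
    simp [pvSkipStr, pvGoB]
  | succ n ih =>
    intro l h d
    match l with
    | [] => simp [pvSkipStr, pvGoB]
    | c :: rest =>
      have hr : rest.length ≤ n := by simp at h; omega
      constructor
      · -- out of string
        rw [List.foldl_cons, pvGoB]
        by_cases hq : c = '"'
        · simp only [pvStepA, hq]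
          simp
          exact (ih rest hr d).2
        · by_cases ho : c = '{' ∨ c = '['
          · simp only [pvStepA, hq, ho]
            simp
            exact (ih rest hr (d + 1)).1
          · by_cases hcl : c = '}' ∨ c = ']'
            · simp only [pvStepA, hq, ho, hcl]
              simp
              exact (ih rest hr (d - 1)).1
            · simp only [pvStepA, hq, ho, hcl]
              simp
              exact (ih rest hr d).1
      · -- inside a string
        rw [List.foldl_cons, pvSkipStr]
        by_cases hb : c = '\\'
        · simp only [pvStepA, hb]
          simp
          match rest with
          | [] => simp [pvSkipStr, pvGoB]
          | x :: rs =>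
            rw [List.foldl_cons]
            simp only [pvStepA]
            simp
            exact (ih rs (by simp at hr ⊢; omega) d).2
        · by_cases hq : c = '"'
          · simp only [pvStepA, hq]
            simp
            exact (ih rest hr d).1
          · simp only [pvStepA, hq, hb]
            simp
            exact (ih rest hr d).2

-- ===== VERDICT (by name: the statement is the Claim_ definition above) =====
theorem count_depth_py_spec : Claim_equal_count_depth_py := by
  intro line _
  unfold Spec_count_depth_py count_depth_py count_depth_py_alt
  exact (pvBoth line.toList.length line.toList le_rfl 0).1
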